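-- pv_equiv track=rewrite | github.com/banyasp/consistencyAI | duplicity/fast_robust_queries.py | _is_response_valid
-- ===== SOURCE A (Python) =====
-- def _is_response_valid(response_text: str) -> bool:
--     """Check if a response is valid and non-empty."""
--     if not response_text or not response_text.strip():
--         return False
--
--     # Check for minimum length (at least 50 characters)
--     if len(response_text.strip()) < 50:
--         return False
--
--     # Check for error patterns
--     error_patterns = [
--         "error", "failed", "timeout", "rate limit", "quota exceeded",
--         "service unavailable", "internal server error", "bad gateway",
--         "empty", "invalid", "no response"
--     ]
--
--     response_lower = response_text.lower()
--     if any(pattern in response_lower for pattern in error_patterns):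
--         return False
--
--     # Check if response contains actual content (at least some letters)
--     if not any(c.isalpha() for c in response_text):
--         return False
--
--     return True
-- ===== SOURCE B (Python) =====
-- # B: the 11 error patterns are compiled once into a prefix trie; one left-to-right
-- # scan walks the trie at each start position instead of 11 independent substring scans.
-- _PATTERNS = (
--     "error", "failed", "timeout", "rate limit", "quota exceeded",
--     "service unavailable", "internal server error", "bad gateway",
--     "empty", "invalid", "no response",
-- )
--
-- def _build_trie(patterns):
--     root = {}
--     for p in patterns:
--         node = root
--         for c in p:
--             node = node.setdefault(c, {})
--         node[None] = True  # accept marker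
--     return root
--
-- _TRIE = _build_trie(_PATTERNS)
--
-- def _is_response_valid(response_text: str) -> bool:
--     # the stripped-length guard subsumes the empty/whitespace checks
--     if len(response_text.strip()) < 50:
--         return False
--     low = response_text.lower()
--     n = len(low)
--     for i in range(n):
--         node = _TRIE
--         j = i
--         while j < n and low[j] in node:
--             node = node[low[j]]
--             if None in node:
--                 return False  # some error pattern occurs at position i
--             j += 1
--     return any(c.isalpha() for c in response_text)
-- ===== Notes on version B (the rewrite author's own statement) =====
-- stated objective: alternative
-- what changed: Replaces A's eleven independent per-pattern substring scans of the lowercased text by a prefix trie built once from the patterns and a single left-to-right scan that walks the trie from each start position (sharing common pattern prefixes), and folds the empty/whitespace guards into the stripped-length check.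
import Mathlib
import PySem

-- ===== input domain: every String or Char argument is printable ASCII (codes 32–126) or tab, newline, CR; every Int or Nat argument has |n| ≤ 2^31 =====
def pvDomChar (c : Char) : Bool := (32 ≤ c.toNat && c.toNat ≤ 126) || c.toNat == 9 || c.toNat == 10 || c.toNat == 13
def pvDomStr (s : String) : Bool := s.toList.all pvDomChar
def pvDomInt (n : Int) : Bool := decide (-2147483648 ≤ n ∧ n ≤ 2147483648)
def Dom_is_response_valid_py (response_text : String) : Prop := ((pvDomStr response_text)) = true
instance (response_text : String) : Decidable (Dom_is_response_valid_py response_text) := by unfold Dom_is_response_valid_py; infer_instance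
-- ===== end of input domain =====

-- B compiles the 11 error patterns into a prefix trie built once and finds a pattern
-- occurrence with one scan walking the trie per start position, instead of one substring
-- scan per pattern; the empty/whitespace guards fold into the stripped-length check (alternative, same cost).


-- ===== PORT A =====
def errPatterns : List (List Char) :=
  ["error".toList, "failed".toList, "timeout".toList, "rate limit".toList,
   "quota exceeded".toList, "service unavailable".toList,
   "internal server error".toList, "bad gateway".toList,
   "empty".toList, "invalid".toList, "no response".toList]

def is_response_valid_py (response_text : String) : Bool :=
  let l := response_text.toList
  if l.isEmpty || (PySem.Chars.strip l).isEmpty then false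
  else if (PySem.Chars.strip l).length < 50 then false
  else
    let response_lower := PySem.Chars.lower l
    if errPatterns.any (fun p => PySem.Chars.isIn p response_lower) then false
    else if !(l.any PySem.Chars.isalpha) then false
    else true

-- ===== PORT B =====
-- first-child/next-sibling encoding of Source B's dict-of-dicts trie
-- (acc = Source B's accept marker `None in node` of the child node keyed by c)
inductive Trie : Type
  | nil : Trie
  | node : Char → Bool → Trie → Trie → Trie
deriving DecidableEq, Repr

-- Source B's `node.setdefault(c, {})`: find-or-create the child for `a` in the
-- sibling chain and apply the rest of the insertion `k` to its subtree
def Trie.insChar (a : Char) (e : Bool) (k : Trie → Trie) : Trie → Trie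
  | .nil => .node a e (k .nil) .nil
  | .node c acc ch nx =>
    if a = c then .node c (acc || e) (k ch) nx
    else .node c acc ch (Trie.insChar a e k nx)

-- Source B's inner `for c in p` insertion loop (the accept marker travels with the last char)
def Trie.insert (w : List Char) : Trie → Trie :=
  match w with
  | [] => fun t => t
  | a :: w' => Trie.insChar a w'.isEmpty (Trie.insert w')

-- Source B's module-level trie built once from the patterns
def builtTrie : Trie := errPatterns.foldl (fun t p => Trie.insert p t) .nil

-- Source B's inner while loop: walk the trie along the suffix, true on an accept marker
def Trie.matches : Trie → List Char → Bool
  | .nil, _ => false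
  | .node _ _ _ _, [] => false
  | .node c acc ch nx, a :: s =>
    if a = c then (acc || Trie.matches ch s) || Trie.matches nx (a :: s)
    else Trie.matches nx (a :: s)

-- Source B's outer for loop over start positions
def Trie.scan (t : Trie) : List Char → Bool
  | [] => false
  | a :: s => Trie.matches t (a :: s) || Trie.scan t s

def is_response_valid_py_alt (response_text : String) : Bool :=
  let l := response_text.toList
  if (PySem.Chars.strip l).length < 50 then false
  else
    let low := PySem.Chars.lower l
    if Trie.scan builtTrie low then false
    else l.any PySem.Chars.isalpha

-- ===== PRECONDITION & SPEC =====
def Spec_is_response_valid_py (response_text : String) (out : Bool) : Prop := out = is_response_valid_py_alt response_text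
instance (response_text : String) (out : Bool) : Decidable (Spec_is_response_valid_py response_text out) := by unfold Spec_is_response_valid_py; infer_instance

-- ===== CLAIM (what is proved, stated in full; the proofs are below) =====
def Claim_equal_is_response_valid_py : Prop := ∀ (response_text : String), Dom_is_response_valid_py response_text → Spec_is_response_valid_py response_text (is_response_valid_py response_text)

-- ===== LEMMAS AND PROOFS =====

-- the set of words stored in a trie
def Trie.words : Trie → List (List Char)
  | .nil => []
  | .node c acc ch nx =>
    (if acc then [[c]] else []) ++ (Trie.words ch).map (c :: ·) ++ Trie.words nx

lemma words_ne_nil (t : Trie) : ∀ w ∈ t.words, w ≠ [] := by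
  induction t with
  | nil => simp [Trie.words]
  | node c acc ch nx ihc ihn =>
    intro w hw
    simp only [Trie.words, List.mem_append, List.mem_map] at hw
    rcases hw with (hm | ⟨v, _, rfl⟩) | h
    · rcases Bool.dichotomy acc with ha | ha <;> simp [ha] at hm; simp [hm]
    · simp
    · exact ihn w h

-- prefix characterization of the words of a node
lemma prefix_words_node (c : Char) (acc : Bool) (ch nx : Trie) (a : Char) (s' : List Char) :
    (∃ w ∈ (Trie.node c acc ch nx).words, w <+: a :: s') ↔
      (a = c ∧ (acc = true ∨ ∃ w ∈ ch.words, w <+: s')) ∨ (∃ w ∈ nx.words, w <+: a :: s') := by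
  simp only [Trie.words, List.mem_append, List.mem_map]
  constructor
  · rintro ⟨w, (hm | ⟨v, hv, rfl⟩) | hm, hp⟩
    · have hw : acc = true ∧ w = [c] := by cases acc <;> simp_all
      obtain ⟨ha, rfl⟩ := hw
      exact Or.inl ⟨(List.cons_prefix_cons.mp hp).1.symm, Or.inl ha⟩
    · obtain ⟨h1, h2⟩ := List.cons_prefix_cons.mp hp
      exact Or.inl ⟨h1.symm, Or.inr ⟨v, hv, h2⟩⟩
    · exact Or.inr ⟨w, hm, hp⟩
  · rintro (⟨rfl, ha | ⟨w, hw, hp⟩⟩ | ⟨w, hw, hp⟩)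
    · exact ⟨[a], Or.inl (Or.inl (by simp [ha])), by simp⟩
    · exact ⟨a :: w, Or.inl (Or.inr ⟨w, hw, rfl⟩), List.cons_prefix_cons.mpr ⟨rfl, hp⟩⟩
    · exact ⟨w, Or.inr hw, hp⟩

-- the trie walk at one position finds exactly the stored words that prefix the suffix
lemma matches_iff (t : Trie) : ∀ (s : List Char),
    t.matches s = true ↔ ∃ w ∈ t.words, w <+: s := by
  induction t with
  | nil => intro s; simp [Trie.matches, Trie.words]
  | node c acc ch nx ihc ihn =>
    intro s
    cases s with
    | nil =>
      simp only [Trie.matches]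
      constructor
      · simp
      · rintro ⟨w, hw, hp⟩
        exact absurd (List.prefix_nil.mp hp) (words_ne_nil _ w hw)
    | cons a s' =>
      rw [prefix_words_node]
      simp only [Trie.matches]
      by_cases hac : a = c
      · simp only [if_pos hac, Bool.or_eq_true, ihc, ihn]
        simp [hac]
      · simp only [if_neg hac, ihn]
        tauto

-- the position scan finds exactly the stored words occurring at some position
lemma scan_iff (t : Trie) : ∀ (s : List Char),
    t.scan s = true ↔ ∃ i, ∃ w ∈ t.words, w <+: s.drop i := by
  intro s
  induction s with
  | nil =>
    simp only [Trie.scan, List.drop_nil]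
    constructor
    · simp
    · rintro ⟨i, w, hw, hp⟩
      exact absurd (List.prefix_nil.mp hp) (words_ne_nil _ w hw)
  | cons a s' ih =>
    simp only [Trie.scan, Bool.or_eq_true, matches_iff, ih]
    constructor
    · rintro (⟨w, hw, hp⟩ | ⟨i, w, hw, hp⟩)
      · exact ⟨0, w, hw, hp⟩
      · exact ⟨i + 1, w, hw, by simpa using hp⟩
    · rintro ⟨i, w, hw, hp⟩
      cases i with
      | zero => exact Or.inl ⟨w, hw, hp⟩
      | succ i => exact Or.inr ⟨i, w, hw, by simpa using hp⟩

-- membership in the words of an inserted trie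
lemma mem_words_insChar (a : Char) (w' : List Char) (k : Trie → Trie)
    (hk : ∀ t x, x ∈ (k t).words ↔ x ∈ t.words ∨ (x = w' ∧ w' ≠ [])) :
    ∀ (t : Trie) (x : List Char),
      x ∈ (Trie.insChar a w'.isEmpty k t).words ↔ x ∈ t.words ∨ x = a :: w' := by
  intro t
  induction t with
  | nil =>
    intro x
    simp only [Trie.insChar, Trie.words, List.mem_append, List.mem_map, hk]
    by_cases hw : w' = [] <;> simp [hw] <;> tauto
  | node c acc ch nx ihc ihn =>
    intro x
    by_cases hac : a = c
    · subst hac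
      by_cases hw : w' = [] <;> by_cases ha : acc <;>
        simp [Trie.insChar, Trie.words, hk, hw, ha, or_and_right, exists_or] <;> aesop
    · simp only [Trie.insChar, if_neg hac, Trie.words, List.mem_append, ihn]
      tauto

lemma mem_words_insert : ∀ (w : List Char) (t : Trie) (x : List Char),
    x ∈ (Trie.insert w t).words ↔ x ∈ t.words ∨ (x = w ∧ w ≠ []) := by
  intro w
  induction w with
  | nil => intro t x; simp [Trie.insert]
  | cons a w' ih =>
    intro t x
    simpa using mem_words_insChar a w' (Trie.insert w') (fun t x => ih t x) t x

lemma mem_words_foldl : ∀ (ps : List (List Char)) (t : Trie) (x : List Char),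
    (∀ p ∈ ps, p ≠ []) →
    (x ∈ (ps.foldl (fun t p => Trie.insert p t) t).words ↔ x ∈ t.words ∨ x ∈ ps) := by
  intro ps
  induction ps with
  | nil => simp
  | cons p ps ih =>
    intro t x hne
    simp only [List.foldl_cons, ih _ x (fun q hq => hne q (List.mem_cons_of_mem p hq)),
      mem_words_insert, List.mem_cons]
    have hp : p ≠ [] := hne p List.mem_cons_self
    tauto

-- membership in the built trie = membership in the pattern list
lemma mem_words_built (x : List Char) :
    x ∈ (Trie.words builtTrie) ↔ x ∈ errPatterns := by
  have h := mem_words_foldl errPatterns .nil x (by decide)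
  simpa [builtTrie, Trie.words] using h

-- A's pattern-outer substring scan = B's trie scan
lemma scan_eq (low : List Char) :
    errPatterns.any (fun p => PySem.Chars.isIn p low) = Trie.scan builtTrie low := by
  apply Bool.eq_iff_iff.mpr
  rw [scan_iff builtTrie]
  simp only [List.any_eq_true]
  constructor
  · rintro ⟨p, hp, hin⟩
    obtain ⟨j, hj⟩ := (PySem.Chars.exists_prefix_drop_iff_isIn p low).mpr hin
    exact ⟨j, p, (mem_words_built p).mpr hp, hj⟩
  · rintro ⟨j, p, hp, hj⟩
    exact ⟨p, (mem_words_built p).mp hp,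
      (PySem.Chars.exists_prefix_drop_iff_isIn p low).mp ⟨j, hj⟩⟩

-- ===== VERDICT (by name: the statement is the Claim_ definition above) =====
theorem is_response_valid_py_spec : Claim_equal_is_response_valid_py := by
  intro s _
  unfold Spec_is_response_valid_py is_response_valid_py is_response_valid_py_alt
  simp only [scan_eq]
  by_cases he : s.toList.isEmpty || (PySem.Chars.strip s.toList).isEmpty
  · simp only [he, if_true]
    have h0 : (PySem.Chars.strip s.toList).length = 0 := by
      rcases Bool.or_eq_true_iff.mp he with h | h
      · simp [List.isEmpty_iff.mp h, PySem.Chars.strip, PySem.Chars.lstrip, PySem.Chars.rstrip]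
      · simp [List.isEmpty_iff.mp h]
    rw [h0]; simp
  · simp only [he]
    split_ifs with h1 h2 h3 <;> simp_all
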